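-- pv_equiv track=rewrite | github.com/cogent3/cogent3 | src/cogent3/maths/stats/kendall.py | as_paired_ranks
-- ===== SOURCE A (Python) =====
-- def as_paired_ranks(x, y):
--     """return as matrix of paired ranks"""
--     n = len(x)
--     paired = list(zip(x, y))
--     x = list(x)
--     y = list(y)
--     x.sort()
--     y.sort()
--     rank_val_map_x = dict(list(zip(x, list(range(n)))))
--     rank_val_map_y = dict(list(zip(y, list(range(n)))))
--     ranked = []
--     for i in range(n):
--         ranked += [[rank_val_map_x[paired[i][0]], rank_val_map_y[paired[i][1]]]]
--     return ranked
-- ===== SOURCE B (Python) =====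
-- def as_paired_ranks(x, y):
--     """return as matrix of paired ranks"""
--     return [[sum(1 for v in x if v <= xi) - 1, sum(1 for v in y if v <= yi) - 1]
--             for xi, yi in zip(x, y)]
-- ===== Notes on version B (the rewrite author's own statement) =====
-- stated objective: simpler
-- what changed: Replaces the sort-both-lists-and-build-rank-dicts pipeline by a direct count: the rank of each value is the number of elements <= it minus one, computed in one comprehension over the zipped pairs.
-- outside the precondition, e.g. on as_paired_ranks([1, 2], [3, 4, 4]): A returns [[0, 0], [1, 1]], B returns [[0, 0], [1, 2]]; on as_paired_ranks([1, 2], [3]): A raises IndexError, B returns [[0, 0]]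
import Mathlib
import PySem

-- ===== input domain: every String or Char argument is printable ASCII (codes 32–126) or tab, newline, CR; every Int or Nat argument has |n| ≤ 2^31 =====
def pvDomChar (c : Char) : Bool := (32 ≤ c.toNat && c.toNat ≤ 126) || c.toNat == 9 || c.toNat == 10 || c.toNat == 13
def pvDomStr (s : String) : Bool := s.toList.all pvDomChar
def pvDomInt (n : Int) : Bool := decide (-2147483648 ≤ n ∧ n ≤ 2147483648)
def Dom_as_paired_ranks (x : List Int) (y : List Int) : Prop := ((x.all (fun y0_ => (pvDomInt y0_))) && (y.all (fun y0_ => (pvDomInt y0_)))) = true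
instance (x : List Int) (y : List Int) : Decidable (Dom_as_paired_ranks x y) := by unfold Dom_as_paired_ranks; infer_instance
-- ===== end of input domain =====

-- B computes each rank directly as (number of elements ≤ the value) - 1 instead of
-- sorting both lists and building value→rank dictionaries; equal size, no speed claim.

-- ===== PORT A =====
def as_paired_ranks (x : List Int) (y : List Int) : List (List Int) :=
  let n : Int := (x.length : Int)
  let paired : List (Int × Int) := x.zip y
  let xs : List Int := PySem.List.sorted x (fun v => v) false
  let ys : List Int := PySem.List.sorted y (fun v => v) false
  let rank_val_map_x : PySem.Dict Int Int :=
    (xs.zip (PySem.List.pyRange 0 n 1)).foldl (fun d p => d.insert p.1 p.2) PySem.Dict.empty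
  let rank_val_map_y : PySem.Dict Int Int :=
    (ys.zip (PySem.List.pyRange 0 n 1)).foldl (fun d p => d.insert p.1 p.2) PySem.Dict.empty
  -- paired[i] / dict lookups are in range / present under Pre_; pyGetD / getD defaults are never hit there
  (PySem.List.pyRange 0 n 1).foldl
    (fun ranked i =>
      let p := PySem.List.pyGetD paired i (0, 0)
      ranked ++ [[rank_val_map_x.getD p.1 0, rank_val_map_y.getD p.2 0]]) []

-- ===== PORT B =====
def as_paired_ranks_alt (x : List Int) (y : List Int) : List (List Int) :=
  (x.zip y).map (fun p =>
    [(x.countP (fun v => v ≤ p.1) : Int) - 1, (y.countP (fun v => v ≤ p.2) : Int) - 1])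

-- ===== PRECONDITION & SPEC =====
-- Pre_ excludes unequal-length inputs: there A raises (IndexError when y is shorter, usually KeyError
-- when y is longer) or, when it does return, the value depends on the accidental zip truncation of y.
def Pre_as_paired_ranks (x : List Int) (y : List Int) : Prop := x.length = y.length
instance (x : List Int) (y : List Int) : Decidable (Pre_as_paired_ranks x y) := by unfold Pre_as_paired_ranks; infer_instance
def pvWitness_as_paired_ranks : List Int × List Int := ([3, 1, 2, 1], [5, 5, 4, 6])

def Spec_as_paired_ranks (x : List Int) (y : List Int) (out : List (List Int)) : Prop := out = as_paired_ranks_alt x y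
instance (x : List Int) (y : List Int) (out : List (List Int)) : Decidable (Spec_as_paired_ranks x y out) := by unfold Spec_as_paired_ranks; infer_instance

-- ===== CLAIM (what is proved, stated in full; the proofs are below) =====
def Claim_equal_as_paired_ranks : Prop := ∀ (x : List Int) (y : List Int), Dom_as_paired_ranks x y → Pre_as_paired_ranks x y → Spec_as_paired_ranks x y (as_paired_ranks x y)

-- ===== LEMMAS AND PROOFS =====

-- 0..n-1 as a list of Ints (the range(n) a rank dict is zipped with).
def rng (n : Nat) : List Int := (List.range n).map (Nat.cast)

lemma rng_succ (n : Nat) : rng (n + 1) = rng n ++ [(n : Int)] := by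
  simp [rng, List.range_succ]

-- The rank dict built from a sorted list zipped with 0..n-1 maps a member v to
-- (count of elements ≤ v) - 1 (the last index of v's run).
lemma rankMap_getD (s : List Int) (hs : s.Pairwise (· ≤ ·)) (v : Int) (hv : v ∈ s) :
    ((s.zip (rng s.length)).foldl
        (fun d p => d.insert p.1 p.2) PySem.Dict.empty).getD v 0
      = (s.countP (fun a => a ≤ v) : Int) - 1 := by
  induction s using List.reverseRecOn with
  | nil => simp at hv
  | append_singleton t a ih =>
    have hlen : t.length = (rng t.length).length := by simp [rng]
    rw [show (t ++ [a]).length = t.length + 1 by simp, rng_succ, List.zip_append hlen,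
        List.foldl_append]
    simp only [List.zip_cons_cons, List.zip_nil_right, List.foldl_cons, List.foldl_nil]
    rw [PySem.Dict.getD_insert]
    have hta : ∀ b ∈ t, b ≤ a := by
      have := List.pairwise_append.mp hs
      exact fun b hb => this.2.2 b hb a (by simp)
    by_cases hva : v = a
    · subst hva
      have hall : ∀ b ∈ t ++ [v], decide (b ≤ v) = true := by
        intro b hb
        rcases List.mem_append.mp hb with hb | hb
        · simpa using hta b hb
        · rw [List.mem_singleton] at hb; subst hb; simp
      rw [if_pos rfl, List.countP_eq_length.mpr hall]
      simp only [List.length_append, List.length_cons, List.length_nil]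
      push_cast; ring
    · have hvt : v ∈ t := by
        rcases List.mem_append.mp hv with h | h
        · exact h
        · simp at h; exact absurd h hva
      have hnav : ¬ (a ≤ v) := fun h => hva (le_antisymm (hta v hvt) h)
      rw [if_neg hva, List.countP_append]
      simp only [List.countP_cons, List.countP_nil, decide_eq_true_eq]
      rw [if_neg hnav]
      simpa using ih (List.pairwise_append.mp hs).1 hvt

-- A's per-pair value equals B's, for any member of x (resp. y).
lemma rank_eq_count (x : List Int) (v : Int) (hv : v ∈ x) :
    (((PySem.List.sorted x (fun v => v) false).zip (rng x.length)).foldl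
        (fun d p => d.insert p.1 p.2) PySem.Dict.empty).getD v 0
      = (x.countP (fun a => a ≤ v) : Int) - 1 := by
  have hperm := PySem.List.sorted_perm x (fun v => v) false
  have hlen : (PySem.List.sorted x (fun v => v) false).length = x.length := hperm.length_eq
  rw [← hlen, rankMap_getD _ (by simpa using PySem.List.sorted_pairwise x (fun v => v))
        v (hperm.mem_iff.mpr hv)]
  rw [hperm.countP_eq]

-- ===== VERDICT (by name: the statement is the Claim_ definition above) =====
theorem as_paired_ranks_spec : Claim_equal_as_paired_ranks := by
  intro x y _ hpre
  unfold Spec_as_paired_ranks as_paired_ranks as_paired_ranks_alt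
  have hplen : (x.zip y).length = x.length := by
    rw [List.length_zip, hpre, Nat.min_self]
  rw [PySem.List.foldl_append_singleton_eq_map
        (f := fun i =>
          [(((PySem.List.sorted x (fun v => v) false).zip
               (PySem.List.pyRange 0 (x.length : Int) 1)).foldl
               (fun d p => d.insert p.1 p.2) PySem.Dict.empty).getD
               (PySem.List.pyGetD (x.zip y) i (0, 0)).1 0,
           (((PySem.List.sorted y (fun v => v) false).zip
               (PySem.List.pyRange 0 (x.length : Int) 1)).foldl
               (fun d p => d.insert p.1 p.2) PySem.Dict.empty).getD
               (PySem.List.pyGetD (x.zip y) i (0, 0)).2 0])]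
  rw [List.nil_append]
  have hlenz : PySem.List.len (x.zip y) = (x.length : Int) := by
    simp [PySem.List.len, hplen]
  have hmap := PySem.List.map_pyGetD_pyRange_zero (x.zip y) ((0 : Int), (0 : Int))
  rw [hlenz] at hmap
  conv_rhs => rw [← hmap, List.map_map]
  refine List.map_congr_left (fun i hi => ?_)
  simp only [Function.comp]
  have hpmem : PySem.List.pyGetD (x.zip y) i ((0 : Int), (0 : Int)) ∈ x.zip y := by
    have h := List.mem_map_of_mem (f := fun j => PySem.List.pyGetD (x.zip y) j ((0 : Int), (0 : Int))) hi
    rw [hmap] at h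
    exact h
  obtain ⟨hp1, hp2⟩ := List.of_mem_zip hpmem
  have hr : PySem.List.pyRange 0 (x.length : Int) 1 = rng x.length := by
    rw [PySem.List.pyRange_zero_natCast]; rfl
  rw [hr, rank_eq_count x (PySem.List.pyGetD (x.zip y) i ((0 : Int), (0 : Int))).1 hp1,
      show rng x.length = rng y.length by rw [hpre],
      rank_eq_count y (PySem.List.pyGetD (x.zip y) i ((0 : Int), (0 : Int))).2 hp2]
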